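-- pv_equiv track=rewrite | github.com/chukwudiobianwu/421 | Assignment 2/a2_q1234.py | recursive_logic_eval
-- ===== SOURCE A (Python) =====
-- def recursive_logic_eval(tokens, bindings):
--     head, tail = tokens[0], tokens[1:]
--
--     if head in ['&', '|', '=>', '<=>']:
--         val1, tail = recursive_logic_eval(tail, bindings)
--         val2, tail = recursive_logic_eval(tail, bindings)
--
--         if head == '&':
--             return int(val1) and int(val2), tail
--         elif head == '|':
--             return int(val1) or int(val2), tail
--         elif head == '=>':
--             return int(not val1) or int(val2), tail
--         elif head == '<=>':
--             return int(val1 == val2), tail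
--     elif head.startswith('~'):
--         variable = head[1:]
--         negated_value = not bindings.get(variable, False)
--         return int(negated_value), tail
--     elif head.isdigit():
--         return int(head), tail
--     else:
--         variable_value = bindings.get(head, False)
--         return int(variable_value), tail
-- ===== SOURCE B (Python) =====
-- # One-pass iterative evaluator: a shared index pointer and an explicit operator
-- # stack replace A's recursion over re-sliced copies of `tokens`.
-- def recursive_logic_eval(tokens, bindings):
--     OPS = ('&', '|', '=>', '<=>')
--
--     def leaf(t):
--         if t.startswith('~'):
--             return int(not bindings.get(t[1:], False))
--         if t.isdigit():
--             return int(t)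
--         return int(bindings.get(t, False))
--
--     def apply(op, v1, v2):
--         if op == '&':
--             return 0 if v1 == 0 else v2
--         if op == '|':
--             return v2 if v1 == 0 else v1
--         if op == '=>':
--             return 1 if v1 == 0 else v2
--         return int(v1 == v2)  # '<=>'
--
--     stack = []  # frames (op, first_operand_or_None)
--     i = 0
--     while True:
--         t = tokens[i]
--         i += 1
--         if t in OPS:
--             stack.append((t, None))
--         else:
--             v = leaf(t)
--             while stack and stack[-1][1] is not None:
--                 op, v1 = stack.pop()
--                 v = apply(op, v1, v)
--             if not stack:
--                 return v, tokens[i:]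
--             op, _ = stack.pop()
--             stack.append((op, v))
-- ===== Notes on version B (the rewrite author's own statement) =====
-- stated objective: alternative
-- what changed: Replaces A's recursion over re-sliced copies of tokens with a single left-to-right pass using an index pointer and an explicit operator stack; it trades recursion for an iterative stack machine at similar measured cost.
import Mathlib
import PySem

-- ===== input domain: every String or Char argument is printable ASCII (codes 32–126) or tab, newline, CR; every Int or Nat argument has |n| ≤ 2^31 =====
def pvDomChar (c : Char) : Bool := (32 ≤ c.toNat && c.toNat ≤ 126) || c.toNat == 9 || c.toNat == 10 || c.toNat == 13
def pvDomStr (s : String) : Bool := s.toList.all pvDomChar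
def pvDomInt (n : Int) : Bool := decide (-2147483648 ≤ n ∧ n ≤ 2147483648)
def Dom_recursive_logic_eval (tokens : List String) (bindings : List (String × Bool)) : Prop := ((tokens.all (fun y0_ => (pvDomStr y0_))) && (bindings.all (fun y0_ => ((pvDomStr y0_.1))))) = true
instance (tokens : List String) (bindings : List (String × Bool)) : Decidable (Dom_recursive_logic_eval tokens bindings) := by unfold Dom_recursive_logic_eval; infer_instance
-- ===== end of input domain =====

-- B replaces A's recursion over re-sliced copies of `tokens` with a single
-- left-to-right pass using an explicit operator stack (objective: alternative).

-- ===== PORT A =====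
-- A raises IndexError on [] and on incomplete prefix expressions; the port returns
-- (0, []) there, outside Pre_.  The subtype carries the bound needed for termination.
def pvEvalA (tokens : List String) (bindings : List (String × Bool)) :
    {p : Int × List String // p.2.length ≤ tokens.length} :=
  match tokens with
  | [] => ⟨(0, []), by simp⟩              -- tokens[0]: IndexError (excluded by Pre_)
  | head :: tail =>
    if head ∈ (["&", "|", "=>", "<=>"] : List String) then
      let r1 := pvEvalA tail bindings
      let r2 := pvEvalA r1.val.2 bindings
      let val1 := r1.val.1
      let val2 := r2.val.1
      -- `int(v)` is the identity on the Int values produced here; `and`/`or`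
      -- return their first operand when it decides the result (ported exactly).
      let res : Int :=
        if head == "&" then (if val1 = 0 then val1 else val2)
        else if head == "|" then (if val1 = 0 then val2 else val1)
        else if head == "=>" then
          (let a : Int := if val1 = 0 then 1 else 0
           if a ≠ 0 then a else val2)
        else (if val1 = val2 then 1 else 0)   -- head == "<=>" (the chain is exhaustive here)
      ⟨(res, r2.val.2), by
        have h1 := r1.property; have h2 := r2.property
        simpa using le_trans h2 (le_trans h1 (Nat.le_succ _))⟩
    else if PySem.Str.startswith head "~" then
      ⟨((if PySem.Dict.getD (PySem.Dict.mk bindings) (PySem.Str.slice head (some 1) none) false then 0 else 1), tail), by simp⟩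
    else if PySem.Str.strIsdigit head then
      ⟨((PySem.Int.ofStr? head).getD 0, tail), by simp⟩   -- int(head); some _ since head.isdigit()
    else
      ⟨((if PySem.Dict.getD (PySem.Dict.mk bindings) head false then 1 else 0), tail), by simp⟩
termination_by tokens.length
decreasing_by
  · simp
  · have h1 := r1.property
    simp; omega

def recursive_logic_eval (tokens : List String) (bindings : List (String × Bool)) : Int × List String :=
  (pvEvalA tokens bindings).val

-- ===== PORT B =====
def pvIsOp (t : String) : Bool := t ∈ (["&", "|", "=>", "<=>"] : List String)

def pvLeaf (t : String) (bindings : List (String × Bool)) : Int :=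
  if PySem.Str.startswith t "~" then
    (if PySem.Dict.getD (PySem.Dict.mk bindings) (PySem.Str.slice t (some 1) none) false then 0 else 1)
  else if PySem.Str.strIsdigit t then
    (PySem.Int.ofStr? t).getD 0          -- int(t); some _ since t.isdigit()
  else
    (if PySem.Dict.getD (PySem.Dict.mk bindings) t false then 1 else 0)

def pvApply (op : String) (v1 v2 : Int) : Int :=
  if op == "&" then (if v1 = 0 then 0 else v2)
  else if op == "|" then (if v1 = 0 then v2 else v1)
  else if op == "=>" then (if v1 = 0 then 1 else v2)
  else (if v1 = v2 then 1 else 0)        -- '<=>'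

-- the inner `while stack and stack[-1][1] is not None` reduction loop
def pvReduce (v : Int) (stack : List (String × Option Int)) : Int × List (String × Option Int) :=
  match stack with
  | (op, some v1) :: s => pvReduce (pvApply op v1 v) s
  | _ => (v, stack)

-- the `while True` loop; the remaining-list argument plays the role of the index
-- pointer i (the final `tokens[i:]` is exactly the list not yet consumed)
def pvGoB (ts : List String) (stack : List (String × Option Int)) (bindings : List (String × Bool)) : Int × List String :=
  match ts with
  | [] => (0, [])                        -- tokens[i]: IndexError (excluded by Pre_)
  | t :: rest =>
    if pvIsOp t then pvGoB rest ((t, none) :: stack) bindings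
    else
      match pvReduce (pvLeaf t bindings) stack with
      | (v', []) => (v', rest)
      | (v', (op, _) :: s) => pvGoB rest ((op, some v') :: s) bindings

def recursive_logic_eval_alt (tokens : List String) (bindings : List (String × Bool)) : Int × List String :=
  pvGoB tokens [] bindings

-- ===== PRECONDITION & SPEC =====
-- Standard arity scan: needing n more expressions, an operator token raises the need
-- to n+1, any other token lowers it; A returns normally iff the need 1 is ever met.
def pvWf : Nat → List String → Bool
  | 0, _ => true
  | _ + 1, [] => false
  | n + 1, t :: ts => pvWf (if t ∈ (["&", "|", "=>", "<=>"] : List String) then n + 2 else n) ts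

-- Pre_ = exactly the inputs on which Python A returns (no IndexError): some prefix
-- of `tokens` forms one complete prefix expression.
def Pre_recursive_logic_eval (tokens : List String) (bindings : List (String × Bool)) : Prop :=
  pvWf 1 tokens = true
instance (tokens : List String) (bindings : List (String × Bool)) : Decidable (Pre_recursive_logic_eval tokens bindings) := by unfold Pre_recursive_logic_eval; infer_instance

def pvWitness_recursive_logic_eval : List String × (List (String × Bool)) :=
  (["&", "x", "~y", "rest"], [("x", true), ("y", false)])

def Spec_recursive_logic_eval (tokens : List String) (bindings : List (String × Bool)) (out : Int × List String) : Prop := out = recursive_logic_eval_alt tokens bindings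
instance (tokens : List String) (bindings : List (String × Bool)) (out : Int × List String) : Decidable (Spec_recursive_logic_eval tokens bindings out) := by unfold Spec_recursive_logic_eval; infer_instance

-- ===== CLAIM (what is proved, stated in full; the proofs are below) =====
def Claim_equal_recursive_logic_eval : Prop := ∀ (tokens : List String) (bindings : List (String × Bool)), Dom_recursive_logic_eval tokens bindings → Pre_recursive_logic_eval tokens bindings → Spec_recursive_logic_eval tokens bindings (recursive_logic_eval tokens bindings)

-- ===== LEMMAS AND PROOFS =====

-- "produce value v with rest unread, then continue with this stack": what pvGoB does
-- after the first complete expression of its input has been evaluated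
def pvFinish (p : Int × List String) (stack : List (String × Option Int)) (bindings : List (String × Bool)) : Int × List String :=
  match pvReduce p.1 stack with
  | (v', []) => (v', p.2)
  | (v', (op, _) :: s) => pvGoB p.2 ((op, some v') :: s) bindings

theorem pvWf_mono : ∀ (ts : List String) (n : Nat), pvWf (n + 1) ts = true → pvWf n ts = true := by
  intro ts
  induction ts with
  | nil => intro n h; simp [pvWf] at h
  | cons t ts ih =>
    intro n h
    match n with
    | 0 => simp [pvWf]
    | m + 1 =>
      simp only [pvWf] at h ⊢
      split at h <;> rename_i hop <;> simp only [hop, if_true, if_false]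
      · exact ih _ h
      · exact ih _ h

theorem pvWf_consume : ∀ (N : Nat) (ts : List String), ts.length ≤ N →
    ∀ (n : Nat) (b : List (String × Bool)), pvWf (n + 1) ts = true →
    pvWf n (pvEvalA ts b).val.2 = true := by
  intro N
  induction N with
  | zero =>
    intro ts hlen n b h
    match ts with
    | [] => simp [pvWf] at h
    | _ :: _ => simp at hlen
  | succ K ih =>
    intro ts hlen n b h
    match ts with
    | [] => simp [pvWf] at h
    | t :: ts' =>
      simp only [pvWf] at h
      by_cases hop : t ∈ (["&", "|", "=>", "<=>"] : List String)
      · rw [if_pos hop] at h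
        have hts' : ts'.length ≤ K := by simpa using Nat.lt_succ_iff.mp (by simpa using hlen)
        have h1 : pvWf (n + 1) (pvEvalA ts' b).val.2 = true := ih ts' hts' (n + 1) b h
        have hlen1 : (pvEvalA ts' b).val.2.length ≤ K := le_trans (pvEvalA ts' b).property hts'
        have h2 := ih _ hlen1 n b h1
        rw [pvEvalA]
        simp only [if_pos hop]
        exact h2
      · rw [if_neg hop] at h
        rw [pvEvalA]
        simp only [if_neg hop]
        split_ifs <;> exact h

theorem pvGoB_finish : ∀ (N : Nat) (ts : List String), ts.length ≤ N →
    ∀ (stack : List (String × Option Int)) (b : List (String × Bool)),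
    pvWf 1 ts = true →
    pvGoB ts stack b = pvFinish (pvEvalA ts b).val stack b := by
  intro N
  induction N with
  | zero =>
    intro ts hlen stack b h
    match ts with
    | [] => simp [pvWf] at h
    | t :: ts' => simp at hlen
  | succ K ih =>
    intro ts hlen stack b h
    match ts with
    | [] => simp [pvWf] at h
    | t :: ts' =>
      simp only [pvWf] at h
      by_cases hop : t ∈ (["&", "|", "=>", "<=>"] : List String)
      · rw [if_pos hop] at h
        have hts' : ts'.length ≤ K := by simpa using Nat.lt_succ_iff.mp (by simpa using hlen)
        have hwf1 : pvWf 1 ts' = true := pvWf_mono ts' 1 h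
        have hisop : pvIsOp t = true := by simpa [pvIsOp] using hop
        have step1 : pvGoB (t :: ts') stack b = pvGoB ts' ((t, none) :: stack) b := by
          rw [pvGoB]; simp [hisop]
        rw [step1, ih ts' hts' _ b hwf1]
        -- pvFinish on a stack topped by (t, none): reduce stops immediately
        have step2 : pvFinish (pvEvalA ts' b).val ((t, none) :: stack) b
            = pvGoB (pvEvalA ts' b).val.2 ((t, some (pvEvalA ts' b).val.1) :: stack) b := by
          simp [pvFinish, pvReduce]
        rw [step2]
        have hwfr1 : pvWf 1 (pvEvalA ts' b).val.2 = true := pvWf_consume K ts' hts' 1 b h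
        have hlenr1 : (pvEvalA ts' b).val.2.length ≤ K := le_trans (pvEvalA ts' b).property hts'
        rw [ih (pvEvalA ts' b).val.2 hlenr1 _ b hwfr1]
        have step3 : pvFinish (pvEvalA (pvEvalA ts' b).val.2 b).val ((t, some (pvEvalA ts' b).val.1) :: stack) b
            = pvFinish (pvApply t (pvEvalA ts' b).val.1 (pvEvalA (pvEvalA ts' b).val.2 b).val.1,
                        (pvEvalA (pvEvalA ts' b).val.2 b).val.2) stack b := by
          simp [pvFinish, pvReduce]
        rw [step3]
        -- A's operator branch value equals pvApply
        have hAval : (pvEvalA (t :: ts') b).val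
            = (pvApply t (pvEvalA ts' b).val.1 (pvEvalA (pvEvalA ts' b).val.2 b).val.1,
               (pvEvalA (pvEvalA ts' b).val.2 b).val.2) := by
          rw [pvEvalA]
          simp only [if_pos hop]
          congr 1
          fin_cases hop <;> simp [pvApply] <;> split_ifs <;> simp_all
        rw [hAval]
      · rw [if_neg hop] at h
        have hisop : pvIsOp t = false := by simpa [pvIsOp] using hop
        have hleaf : (pvEvalA (t :: ts') b).val = (pvLeaf t b, ts') := by
          rw [pvEvalA]
          simp only [if_neg hop, pvLeaf]
          split_ifs <;> rfl
        rw [hleaf]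
        rw [pvGoB]
        simp only [hisop, Bool.false_eq_true, if_false, pvFinish]

-- ===== VERDICT (by name: the statement is the Claim_ definition above) =====
theorem recursive_logic_eval_spec : Claim_equal_recursive_logic_eval := by
  intro tokens bindings _ hpre
  unfold Spec_recursive_logic_eval recursive_logic_eval recursive_logic_eval_alt
  rw [pvGoB_finish tokens.length tokens le_rfl [] bindings hpre]
  simp [pvFinish, pvReduce]
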